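-- pv_equiv track=rewrite | github.com/Hussnainaliresearcher/chatbot_organic_farming | pakistan_context.py | is_agricultural_query
-- ===== SOURCE A (Python) =====
-- def is_agricultural_query(query):
--     """Check if query is related to agriculture/farming"""
--     agricultural_keywords = [
--         # Crops and farming
--         'crop', 'crops', 'farming', 'agriculture', 'cultivation', 'grow', 'growing',
--         'plant', 'planting', 'harvest', 'harvesting', 'seed', 'seeds', 'organic',
--
--         # Soil and land
--         'soil', 'land', 'earth', 'field', 'farm', 'irrigation', 'fertilizer',
--         'compost', 'manure', 'pesticide', 'herbicide',
--
--         # Weather and climate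
--         'climate', 'weather', 'rainfall', 'rain', 'temperature', 'season', 'seasonal',
--         'monsoon', 'drought', 'water',
--
--         # Specific crops (common ones)
--         'wheat', 'rice', 'cotton', 'sugarcane', 'maize', 'corn', 'mango', 'mangoes',
--         'citrus', 'banana', 'apple', 'grapes', 'dates', 'onion', 'potato', 'tomato',
--         'chili', 'garlic', 'ginger', 'turmeric', 'vegetables', 'fruits',
--
--         # Locations (Pakistan geography)
--         'pakistan', 'province', 'district', 'zone', 'punjab', 'sindh', 'balochistan',
--         'khyber pakhtunkhwa', 'kpk', 'karachi', 'lahore', 'islamabad', 'faisalabad',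
--
--         # Agricultural practices
--         'sowing', 'reaping', 'tillage', 'plowing', 'rotation', 'intercropping',
--         'livestock', 'dairy', 'poultry', 'cattle', 'buffalo', 'goat', 'sheep'
--     ]
--
--     query_lower = query.lower()
--
--     # Check if query contains any agricultural keywords
--     return any(keyword in query_lower for keyword in agricultural_keywords)
-- ===== SOURCE B (Python) =====
-- import re
--
-- # All keywords in one comma-separated string (none contains a comma), split once
-- # at import time; a compiled alternation of the escaped literals then does a
-- # single automaton-driven scan of the lowercased query instead of one substring
-- # search per keyword.
-- _AGRI_KEYWORD_CSV = (
--     "crop,crops,farming,agriculture,cultivation,grow,growing,"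
--     "plant,planting,harvest,harvesting,seed,seeds,organic,"
--     "soil,land,earth,field,farm,irrigation,fertilizer,"
--     "compost,manure,pesticide,herbicide,"
--     "climate,weather,rainfall,rain,temperature,season,seasonal,"
--     "monsoon,drought,water,"
--     "wheat,rice,cotton,sugarcane,maize,corn,mango,mangoes,"
--     "citrus,banana,apple,grapes,dates,onion,potato,tomato,"
--     "chili,garlic,ginger,turmeric,vegetables,fruits,"
--     "pakistan,province,district,zone,punjab,sindh,balochistan,"
--     "khyber pakhtunkhwa,kpk,karachi,lahore,islamabad,faisalabad,"
--     "sowing,reaping,tillage,plowing,rotation,intercropping,"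
--     "livestock,dairy,poultry,cattle,buffalo,goat,sheep"
-- )
--
-- _AGRI_PATTERN = re.compile(
--     "|".join(re.escape(k) for k in _AGRI_KEYWORD_CSV.split(","))
-- )
--
--
-- def is_agricultural_query(query):
--     """Check if query is related to agriculture/farming"""
--     return _AGRI_PATTERN.search(query.lower()) is not None
-- ===== Notes on version B (the rewrite author's own statement) =====
-- stated objective: idiomatic
-- what changed: B keeps the keywords as one comma-separated string split once at import, compiles a single regular expression alternating the escaped keywords and tests it with one search over the lowercased query (position-driven scan trying each alternative as a prefix at each position), instead of A's keyword-driven loop doing a separate substring search per keyword.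
import Mathlib
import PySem

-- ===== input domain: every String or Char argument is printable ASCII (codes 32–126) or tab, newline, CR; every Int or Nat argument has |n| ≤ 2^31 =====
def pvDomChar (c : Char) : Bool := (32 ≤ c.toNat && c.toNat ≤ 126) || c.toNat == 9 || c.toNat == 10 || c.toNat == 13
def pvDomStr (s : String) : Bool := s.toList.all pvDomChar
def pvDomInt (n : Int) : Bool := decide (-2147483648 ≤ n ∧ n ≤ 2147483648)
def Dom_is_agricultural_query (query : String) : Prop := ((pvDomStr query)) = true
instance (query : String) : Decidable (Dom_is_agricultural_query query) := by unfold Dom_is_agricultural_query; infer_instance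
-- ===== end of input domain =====

-- B stores the keywords as one comma-separated string split once, and replaces A's
-- per-keyword substring loop by a single position-driven scan of the lowercased query
-- that tries each alternative as a prefix at every position (what re.search does for a
-- literal alternation); objective: idiomatic.

-- ===== PORT A =====
def pvKeywordsA : List String :=
  ["crop", "crops", "farming", "agriculture", "cultivation", "grow", "growing", "plant", "planting", "harvest", "harvesting", "seed", "seeds", "organic", "soil", "land", "earth", "field", "farm", "irrigation", "fertilizer", "compost", "manure", "pesticide", "herbicide", "climate", "weather", "rainfall", "rain", "temperature", "season", "seasonal", "monsoon", "drought", "water", "wheat", "rice", "cotton", "sugarcane", "maize", "corn", "mango", "mangoes", "citrus", "banana", "apple", "grapes", "dates", "onion", "potato", "tomato", "chili", "garlic", "ginger", "turmeric", "vegetables", "fruits", "pakistan", "province", "district", "zone", "punjab", "sindh", "balochistan", "khyber pakhtunkhwa", "kpk", "karachi", "lahore", "islamabad", "faisalabad", "sowing", "reaping", "tillage", "plowing", "rotation", "intercropping", "livestock", "dairy", "poultry", "cattle", "buffalo", "goat", "sheep"]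

def is_agricultural_query (query : String) : Bool :=
  let query_lower := PySem.Str.lower query
  pvKeywordsA.any (fun keyword => PySem.Str.isIn keyword query_lower)

-- ===== PORT B =====
-- Source B builds its pattern at import time: the CSV constant split at the comma and each
-- escaped keyword made an alternative of the compiled regex. That module-level
-- computation is evaluated here; pvAlts is the resulting literal alternation (each
-- alternative as its character sequence, as the compiled pattern holds it).
def pvAlts : List (List Char) :=
  [['c', 'r', 'o', 'p'],
   ['c', 'r', 'o', 'p', 's'],
   ['f', 'a', 'r', 'm', 'i', 'n', 'g'],
   ['a', 'g', 'r', 'i', 'c', 'u', 'l', 't', 'u', 'r', 'e'],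
   ['c', 'u', 'l', 't', 'i', 'v', 'a', 't', 'i', 'o', 'n'],
   ['g', 'r', 'o', 'w'],
   ['g', 'r', 'o', 'w', 'i', 'n', 'g'],
   ['p', 'l', 'a', 'n', 't'],
   ['p', 'l', 'a', 'n', 't', 'i', 'n', 'g'],
   ['h', 'a', 'r', 'v', 'e', 's', 't'],
   ['h', 'a', 'r', 'v', 'e', 's', 't', 'i', 'n', 'g'],
   ['s', 'e', 'e', 'd'],
   ['s', 'e', 'e', 'd', 's'],
   ['o', 'r', 'g', 'a', 'n', 'i', 'c'],
   ['s', 'o', 'i', 'l'],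
   ['l', 'a', 'n', 'd'],
   ['e', 'a', 'r', 't', 'h'],
   ['f', 'i', 'e', 'l', 'd'],
   ['f', 'a', 'r', 'm'],
   ['i', 'r', 'r', 'i', 'g', 'a', 't', 'i', 'o', 'n'],
   ['f', 'e', 'r', 't', 'i', 'l', 'i', 'z', 'e', 'r'],
   ['c', 'o', 'm', 'p', 'o', 's', 't'],
   ['m', 'a', 'n', 'u', 'r', 'e'],
   ['p', 'e', 's', 't', 'i', 'c', 'i', 'd', 'e'],
   ['h', 'e', 'r', 'b', 'i', 'c', 'i', 'd', 'e'],
   ['c', 'l', 'i', 'm', 'a', 't', 'e'],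
   ['w', 'e', 'a', 't', 'h', 'e', 'r'],
   ['r', 'a', 'i', 'n', 'f', 'a', 'l', 'l'],
   ['r', 'a', 'i', 'n'],
   ['t', 'e', 'm', 'p', 'e', 'r', 'a', 't', 'u', 'r', 'e'],
   ['s', 'e', 'a', 's', 'o', 'n'],
   ['s', 'e', 'a', 's', 'o', 'n', 'a', 'l'],
   ['m', 'o', 'n', 's', 'o', 'o', 'n'],
   ['d', 'r', 'o', 'u', 'g', 'h', 't'],
   ['w', 'a', 't', 'e', 'r'],
   ['w', 'h', 'e', 'a', 't'],
   ['r', 'i', 'c', 'e'],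
   ['c', 'o', 't', 't', 'o', 'n'],
   ['s', 'u', 'g', 'a', 'r', 'c', 'a', 'n', 'e'],
   ['m', 'a', 'i', 'z', 'e'],
   ['c', 'o', 'r', 'n'],
   ['m', 'a', 'n', 'g', 'o'],
   ['m', 'a', 'n', 'g', 'o', 'e', 's'],
   ['c', 'i', 't', 'r', 'u', 's'],
   ['b', 'a', 'n', 'a', 'n', 'a'],
   ['a', 'p', 'p', 'l', 'e'],
   ['g', 'r', 'a', 'p', 'e', 's'],
   ['d', 'a', 't', 'e', 's'],
   ['o', 'n', 'i', 'o', 'n'],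
   ['p', 'o', 't', 'a', 't', 'o'],
   ['t', 'o', 'm', 'a', 't', 'o'],
   ['c', 'h', 'i', 'l', 'i'],
   ['g', 'a', 'r', 'l', 'i', 'c'],
   ['g', 'i', 'n', 'g', 'e', 'r'],
   ['t', 'u', 'r', 'm', 'e', 'r', 'i', 'c'],
   ['v', 'e', 'g', 'e', 't', 'a', 'b', 'l', 'e', 's'],
   ['f', 'r', 'u', 'i', 't', 's'],
   ['p', 'a', 'k', 'i', 's', 't', 'a', 'n'],
   ['p', 'r', 'o', 'v', 'i', 'n', 'c', 'e'],
   ['d', 'i', 's', 't', 'r', 'i', 'c', 't'],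
   ['z', 'o', 'n', 'e'],
   ['p', 'u', 'n', 'j', 'a', 'b'],
   ['s', 'i', 'n', 'd', 'h'],
   ['b', 'a', 'l', 'o', 'c', 'h', 'i', 's', 't', 'a', 'n'],
   ['k', 'h', 'y', 'b', 'e', 'r', ' ', 'p', 'a', 'k', 'h', 't', 'u', 'n', 'k', 'h', 'w', 'a'],
   ['k', 'p', 'k'],
   ['k', 'a', 'r', 'a', 'c', 'h', 'i'],
   ['l', 'a', 'h', 'o', 'r', 'e'],
   ['i', 's', 'l', 'a', 'm', 'a', 'b', 'a', 'd'],
   ['f', 'a', 'i', 's', 'a', 'l', 'a', 'b', 'a', 'd'],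
   ['s', 'o', 'w', 'i', 'n', 'g'],
   ['r', 'e', 'a', 'p', 'i', 'n', 'g'],
   ['t', 'i', 'l', 'l', 'a', 'g', 'e'],
   ['p', 'l', 'o', 'w', 'i', 'n', 'g'],
   ['r', 'o', 't', 'a', 't', 'i', 'o', 'n'],
   ['i', 'n', 't', 'e', 'r', 'c', 'r', 'o', 'p', 'p', 'i', 'n', 'g'],
   ['l', 'i', 'v', 'e', 's', 't', 'o', 'c', 'k'],
   ['d', 'a', 'i', 'r', 'y'],
   ['p', 'o', 'u', 'l', 't', 'r', 'y'],
   ['c', 'a', 't', 't', 'l', 'e'],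
   ['b', 'u', 'f', 'f', 'a', 'l', 'o'],
   ['g', 'o', 'a', 't'],
   ['s', 'h', 'e', 'e', 'p']]

-- Hand port of Source B's `re.search` for its pattern — an alternation of escaped LITERAL
-- keywords. For such a pattern re.search means exactly: at some start position of the
-- text, some alternative matches as a prefix; this is exact for literal alternations
-- (no regex metacharacters survive re.escape).
def pvMatchAt (alts : List (List Char)) (s : List Char) : Bool :=
  alts.any (fun k => PySem.Chars.startswith s k)

def pvSearch (alts : List (List Char)) : List Char → Bool
  | [] => false
  | c :: rest => pvMatchAt alts (c :: rest) || pvSearch alts rest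

def is_agricultural_query_alt (query : String) : Bool :=
  pvSearch pvAlts (PySem.Str.lower query).toList

-- ===== PRECONDITION & SPEC =====
def Spec_is_agricultural_query (query : String) (out : Bool) : Prop := out = is_agricultural_query_alt query
instance (query : String) (out : Bool) : Decidable (Spec_is_agricultural_query query out) := by unfold Spec_is_agricultural_query; infer_instance

-- ===== CLAIM =====
def Claim_equal_is_agricultural_query : Prop := ∀ (query : String), Dom_is_agricultural_query query → Spec_is_agricultural_query query (is_agricultural_query query)

-- ===== LEMMAS AND PROOFS =====

-- Source B's split CSV recovers exactly A's keyword list.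
theorem pvAlts_eq : pvAlts = pvKeywordsA.map String.toList := by decide

theorem pvMatchAt_true_iff (alts : List (List Char)) (s : List Char) :
    pvMatchAt alts s = true ↔ ∃ k ∈ alts, k <+: s := by
  simp [pvMatchAt, List.any_eq_true, PySem.Chars.startswith_iff]

theorem pvSearch_true_iff (alts : List (List Char)) (s : List Char)
    (h0 : pvMatchAt alts [] = false) :
    pvSearch alts s = true ↔ ∃ j, pvMatchAt alts (s.drop j) = true := by
  induction s with
  | nil =>
    simp [pvSearch, h0]
  | cons c rest ih =>
    simp only [pvSearch, Bool.or_eq_true, ih]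
    constructor
    · rintro (h | ⟨j, hj⟩)
      · exact ⟨0, h⟩
      · exact ⟨j + 1, hj⟩
    · rintro ⟨j, hj⟩
      cases j with
      | zero => exact Or.inl hj
      | succ j => exact Or.inr ⟨j, hj⟩

-- ===== VERDICT =====
theorem is_agricultural_query_spec : Claim_equal_is_agricultural_query := by
  intro query _
  unfold Spec_is_agricultural_query is_agricultural_query is_agricultural_query_alt
  rw [pvAlts_eq, Bool.eq_iff_iff]
  have h0 : pvMatchAt (pvKeywordsA.map String.toList) [] = false := by decide
  rw [pvSearch_true_iff _ _ h0]
  simp only [List.any_eq_true, PySem.Str.isIn_iff_infix, pvMatchAt_true_iff, List.mem_map]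
  constructor
  · rintro ⟨k, hk, hinf⟩
    rcases (PySem.Chars.exists_prefix_drop_iff_isIn k.toList (PySem.Str.lower query).toList).mpr
        ((PySem.Chars.isIn_iff_infix _ _).mpr hinf) with ⟨j, hj⟩
    exact ⟨j, k.toList, ⟨k, hk, rfl⟩, hj⟩
  · rintro ⟨j, ks, ⟨k, hk, rfl⟩, hpre⟩
    refine ⟨k, hk, ?_⟩
    have : PySem.Chars.isIn k.toList (PySem.Str.lower query).toList = true :=
      (PySem.Chars.exists_prefix_drop_iff_isIn _ _).mp ⟨j, hpre⟩
    exact (PySem.Chars.isIn_iff_infix _ _).mp this
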